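-- pv_equiv track=rewrite | github.com/Backpulver/Introduction-to-Python | homework2/optimizations.py | nums_to_text
-- ===== SOURCE A (Python) =====
-- def nums_to_text(nums):
--     nums.append(1)
--     alphabet_matrix = [[" "], [], ["c", "a", "b"], ["f", "d", "e"], ["i", "g", "h"], ["l", "j", "k"],
--                      ["o", "m", "n"], ["s", "p", "q", "r"], ["v", "t", "u"], ["z", "w", "x", "y"]]
--     msg = ""
--     count = 0
--     previous = None
--
--     for elem in nums:
--         if previous == elem or previous == None:
--             count += 1
--         else:
--             if previous != -1:
--                 mod3 = count % 3
--                 mod4 = count % 4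
--
--                 if previous == 0:
--                     msg += alphabet_matrix[previous][0]
--                 elif previous == 7 or previous == 9:
--                     msg += alphabet_matrix[previous][mod4]
--                 else:
--                     msg += alphabet_matrix[previous][mod3]
--             count = 1
--         previous = elem
--
--
--     return msg
-- ===== SOURCE B (Python) =====
-- def nums_to_text(nums):
--     nums.append(1)
--     alphabet_matrix = [[" "], [], ["c", "a", "b"], ["f", "d", "e"], ["i", "g", "h"], ["l", "j", "k"],
--                        ["o", "m", "n"], ["s", "p", "q", "r"], ["v", "t", "u"], ["z", "w", "x", "y"]]
--     # pass 1: materialize the run table (value, length)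
--     runs = []
--     cur, cnt = nums[0], 1
--     for x in nums[1:]:
--         if x == cur:
--             cnt += 1
--         else:
--             runs.append((cur, cnt))
--             cur, cnt = x, 1
--     runs.append((cur, cnt))
--     # pass 2: emit every run except the final sentinel-merged one
--     parts = []
--     for k, c in runs[:-1]:
--         if k == -1:
--             continue
--         if k == 0:
--             parts.append(alphabet_matrix[k][0])
--         elif k in (7, 9):
--             parts.append(alphabet_matrix[k][c % 4])
--         else:
--             parts.append(alphabet_matrix[k][c % 3])
--     return "".join(parts)
-- ===== Notes on version B (the rewrite author's own statement) =====
-- stated objective: idiomatic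
-- what changed: B replaces A's single accumulating state machine (msg/count/previous mutated per element) with two separate passes: it first materializes an explicit run-length table, then emits every run except the final sentinel-merged one into a list joined at the end.
import Mathlib
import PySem

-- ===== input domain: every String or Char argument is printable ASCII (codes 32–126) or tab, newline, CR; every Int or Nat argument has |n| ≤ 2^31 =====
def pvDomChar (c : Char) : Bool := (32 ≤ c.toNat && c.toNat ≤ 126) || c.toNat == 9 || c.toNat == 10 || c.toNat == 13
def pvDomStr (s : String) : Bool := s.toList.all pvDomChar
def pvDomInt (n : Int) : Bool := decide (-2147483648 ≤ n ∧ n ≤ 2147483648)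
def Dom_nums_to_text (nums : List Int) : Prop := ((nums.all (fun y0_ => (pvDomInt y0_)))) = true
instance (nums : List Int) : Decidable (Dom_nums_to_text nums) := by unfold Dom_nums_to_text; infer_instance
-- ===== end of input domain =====

-- B re-implements A as two passes (build the run table, then emit all runs but the last);
-- objective: simpler/idiomatic decomposition, same cost. Equivalence is about the RETURN value;
-- both Pythons perform the same caller-visible `nums.append(1)` mutation.

-- shared data: the T9 alphabet matrix
def pvMatrix : List (List String) :=
  [[" "], [], ["c", "a", "b"], ["f", "d", "e"], ["i", "g", "h"], ["l", "j", "k"],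
   ["o", "m", "n"], ["s", "p", "q", "r"], ["v", "t", "u"], ["z", "w", "x", "y"]]

-- matrix[i][j] with Python (possibly negative) indexing; Pre_ keeps both lookups in range
def pvIdx (i j : Int) : String :=
  ((PySem.List.pyGet? pvMatrix i).bind (fun row => PySem.List.pyGet? row j)).getD ""

-- ===== PORT A =====
-- the flush performed in A's else-branch (previous ≠ elem, previous ≠ None)
def pvFlushA (previous : Option Int) (count : Int) : String :=
  match previous with
  | none => ""   -- unreachable: the else-branch implies previous ≠ None
  | some p =>
    if p ≠ -1 then
      let mod3 := PySem.Int.mod count 3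
      let mod4 := PySem.Int.mod count 4
      if p = 0 then pvIdx p 0
      else if p = 7 ∨ p = 9 then pvIdx p mod4
      else pvIdx p mod3
    else ""

-- A's single accumulating loop over nums (after the sentinel append), state (msg, count, previous)
def pvLoopA : String → Int → Option Int → List Int → String
  | msg, _, _, [] => msg
  | msg, count, previous, elem :: rest =>
    if previous = some elem ∨ previous = none then
      pvLoopA msg (count + 1) (some elem) rest
    else
      pvLoopA (msg ++ pvFlushA previous count) 1 (some elem) rest

def nums_to_text (nums : List Int) : String :=
  pvLoopA "" 0 none (nums ++ [1])

-- ===== PORT B =====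
-- pass 1 of Source B: run-length encode into (value, length) pairs
def pvRuns : Int → Int → List Int → List (Int × Int)
  | cur, cnt, [] => [(cur, cnt)]
  | cur, cnt, x :: xs => if x = cur then pvRuns cur (cnt + 1) xs else (cur, cnt) :: pvRuns x 1 xs

-- pass 2 of Source B, one run: `continue` on -1 becomes none
def pvEmitB (k c : Int) : Option String :=
  if k = -1 then none
  else some (if k = 0 then pvIdx k 0
             else if k = 7 ∨ k = 9 then pvIdx k (PySem.Int.mod c 4)
             else pvIdx k (PySem.Int.mod c 3))

def nums_to_text_alt (nums : List Int) : String :=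
  let ns := nums ++ [1]
  let runs := match ns with
    | [] => []
    | x :: xs => pvRuns x 1 xs
  String.join (runs.dropLast.filterMap (fun r => pvEmitB r.1 r.2))

-- ===== PRECONDITION & SPEC =====
-- Pre_ excludes exactly the inputs where the Python A raises IndexError: a non-trailing 1 or any
-- -9 / out-of-range value indexes an empty or missing matrix row, and a maximal run of -10 whose
-- length is not divisible by 3 over-indexes the single-character space row it wraps to.
def Pre_nums_to_text (nums : List Int) : Prop :=
  (∀ x ∈ nums, -10 ≤ x ∧ x ≤ 9 ∧ x ≠ -9) ∧
  (∀ p ∈ nums.zip nums.tail, p.1 = 1 → p.2 = 1) ∧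
  (∀ i ∈ List.range nums.length, ∀ j ∈ List.range nums.length, i ≤ j →
    (∀ t ∈ List.range nums.length, i ≤ t → t ≤ j → nums.getD t 0 = -10) →
    (i = 0 ∨ nums.getD (i - 1) 0 ≠ -10) →
    (j = nums.length - 1 ∨ nums.getD (j + 1) 0 ≠ -10) →
    (j + 1 - i) % 3 = 0)
instance (nums : List Int) : Decidable (Pre_nums_to_text nums) := by unfold Pre_nums_to_text; infer_instance

def pvWitness_nums_to_text : List Int := [4, 4, 0, 7, 7, 7, 7, -1, 2]

def Spec_nums_to_text (nums : List Int) (out : String) : Prop := out = nums_to_text_alt nums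
instance (nums : List Int) (out : String) : Decidable (Spec_nums_to_text nums out) := by unfold Spec_nums_to_text; infer_instance

-- ===== CLAIM (what is proved, stated in full; the proofs are below) =====
def Claim_equal_nums_to_text : Prop := ∀ (nums : List Int), Dom_nums_to_text nums → Pre_nums_to_text nums → Spec_nums_to_text nums (nums_to_text nums)

-- ===== LEMMAS AND PROOFS =====

theorem pvRuns_ne_nil (cur cnt : Int) (xs : List Int) : pvRuns cur cnt xs ≠ [] := by
  induction xs generalizing cur cnt with
  | nil => simp [pvRuns]
  | cons x xs ih =>
    simp only [pvRuns]
    split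
    · exact ih _ _
    · simp

theorem pvFlush_emit (p c : Int) : pvFlushA (some p) c = (pvEmitB p c).getD "" := by
  by_cases h : p = -1 <;> simp [pvFlushA, pvEmitB, h]

theorem pvFoldFrom (L : List String) : ∀ s : String,
    List.foldl (fun r t => r ++ t) s L = s ++ List.foldl (fun r t => r ++ t) "" L := by
  induction L with
  | nil => intro s; simp
  | cons a L ih =>
    intro s
    simp only [List.foldl_cons]
    rw [ih (s ++ a), ih ("" ++ a)]
    simp [String.append_assoc]

theorem pvJoinCons (s : String) (L : List String) : String.join (s :: L) = s ++ String.join L := by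
  simp only [String.join, List.foldl_cons]
  rw [pvFoldFrom]
  simp

theorem pvLoop_runs (xs : List Int) : ∀ (cur cnt : Int) (msg : String),
    pvLoopA msg cnt (some cur) xs
      = msg ++ String.join ((pvRuns cur cnt xs).dropLast.filterMap (fun r => pvEmitB r.1 r.2)) := by
  induction xs with
  | nil => intro cur cnt msg; simp [pvLoopA, pvRuns, String.join]
  | cons x xs ih =>
    intro cur cnt msg
    by_cases h : cur = x
    · subst h
      simpa only [pvLoopA, pvRuns, if_pos rfl, eq_self_iff_true, true_or, if_true] using ih _ (cnt + 1) msg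
    · have hne : ¬ (some cur = some x ∨ some cur = (none : Option Int)) := by
        simp [h]
      simp only [pvLoopA, if_neg hne, pvRuns, if_neg (Ne.symm h)]
      rw [ih x 1 (msg ++ pvFlushA (some cur) cnt)]
      rw [List.dropLast_cons_of_ne_nil (pvRuns_ne_nil x 1 xs)]
      rw [List.filterMap_cons]
      cases he : pvEmitB cur cnt with
      | none =>
        have : pvFlushA (some cur) cnt = "" := by rw [pvFlush_emit, he]; rfl
        simp [this]
      | some s =>
        have hf : pvFlushA (some cur) cnt = s := by rw [pvFlush_emit, he]; rfl
        rw [hf, pvJoinCons, String.append_assoc]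

theorem ports_agree (nums : List Int) : nums_to_text nums = nums_to_text_alt nums := by
  cases nums with
  | nil => rfl
  | cons n rest =>
    show pvLoopA "" 0 none ((n :: rest) ++ [1]) = _
    have h1 : pvLoopA "" 0 none ((n :: rest) ++ [1]) = pvLoopA "" 1 (some n) (rest ++ [1]) := by
      simp [pvLoopA]
    rw [h1, pvLoop_runs]
    simp [nums_to_text_alt]

-- ===== VERDICT (by name: the statement is the Claim_ definition above) =====
theorem nums_to_text_spec : Claim_equal_nums_to_text := by
  intro nums _ _
  unfold Spec_nums_to_text
  exact ports_agree nums
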